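-- pv_equiv track=rewrite | github.com/OrbitalExplorer/SkiNavIndexes | scripts/normalize.py | collect_name_variants
-- ===== SOURCE A (Python) =====
-- from typing import Any
--
-- def collect_name_variants(tags: dict[str, Any]) -> list[str]:
--     """Collect all name variants from OSM tags."""
--     names = []
--
--     if "name" in tags:
--         names.append(tags["name"])
--
--     if "alt_name" in tags:
--         alt_names = [n.strip() for n in tags["alt_name"].split(";") if n.strip()]
--         names.extend(alt_names)
--
--     for key, value in tags.items():
--         if key.startswith("name:") and value:
--             names.append(value)
--
--     if "loc_name" in tags:
--         names.append(tags["loc_name"])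
--     for key, value in tags.items():
--         if key.startswith("loc_name:") and value:
--             names.append(value)
--
--     if "short_name" in tags:
--         names.append(tags["short_name"])
--     for key, value in tags.items():
--         if key.startswith("short_name:") and value:
--             names.append(value)
--
--     seen = set()
--     deduplicated = []
--     for name in names:
--         name = name.strip()
--         if name and name not in seen and len(name) <= 200:
--             seen.add(name)
--             deduplicated.append(name)
--
--     return deduplicated
-- ===== SOURCE B (Python) =====
-- def collect_name_variants(tags):
--     """Collect all name variants from OSM tags (single-pass bucket routing)."""
--     name, alt, name_c = [], [], []
--     loc, loc_c = [], []
--     short, short_c = [], []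
--     for key, value in tags.items():
--         if key == "name":
--             name.append(value)
--         elif key == "alt_name":
--             alt.extend(p for p in (s.strip() for s in value.split(";")) if p)
--         elif key.startswith("name:"):
--             if value:
--                 name_c.append(value)
--         elif key == "loc_name":
--             loc.append(value)
--         elif key.startswith("loc_name:"):
--             if value:
--                 loc_c.append(value)
--         elif key == "short_name":
--             short.append(value)
--         elif key.startswith("short_name:"):
--             if value:
--                 short_c.append(value)
--     seen = set()
--     out = []
--     for n in name + alt + name_c + loc + loc_c + short + short_c:
--         n = n.strip()
--         if n and n not in seen and len(n) <= 200:
--             seen.add(n)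
--             out.append(n)
--     return out
-- ===== Notes on version B (the rewrite author's own statement) =====
-- stated objective: alternative
-- what changed: B replaces A's six separate scans/lookups over the dict (two membership lookups per exact key plus three full prefix-filter passes) by ONE pass over tags.items() that routes each entry into seven ordered buckets via an elif chain, then concatenates the buckets and deduplicates.
import Mathlib
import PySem

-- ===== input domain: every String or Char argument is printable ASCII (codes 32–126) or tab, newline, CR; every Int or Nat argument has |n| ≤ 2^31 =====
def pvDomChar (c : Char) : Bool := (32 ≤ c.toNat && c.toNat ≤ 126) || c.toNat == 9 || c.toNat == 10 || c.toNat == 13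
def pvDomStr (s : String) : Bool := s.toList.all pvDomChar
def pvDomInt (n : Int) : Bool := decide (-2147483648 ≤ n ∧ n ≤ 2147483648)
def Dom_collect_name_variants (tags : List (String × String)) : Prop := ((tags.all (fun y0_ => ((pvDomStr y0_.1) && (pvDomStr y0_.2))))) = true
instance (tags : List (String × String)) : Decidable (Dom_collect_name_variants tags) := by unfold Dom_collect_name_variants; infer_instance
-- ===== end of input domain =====

-- B does ONE pass over tags.items() routing each entry into seven ordered buckets
-- (exact name / alt_name parts / name: / loc_name / loc_name: / short_name / short_name:)
-- instead of A's repeated membership lookups and three prefix-filter passes; the final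
-- strip/nonempty/unseen/len<=200 dedup is unchanged.

-- ===== PORT A =====
-- Python dict lookup on the association list: first match.
def pvGet? : List (String × String) → String → Option String
  | [], _ => none
  | (k', v) :: rest, k => if k' == k then some v else pvGet? rest k

-- A's dedup loop (seen set + output list)
def pvDedupA : List String → PySem.Set String → List String → List String
  | [], _, acc => acc
  | n :: rest, seen, acc =>
    let s := PySem.Str.strip n
    if s != "" && !(PySem.Set.contains seen s) && decide (PySem.Str.len s ≤ 200) then
      pvDedupA rest (PySem.Set.add seen s) (acc ++ [s])
    else pvDedupA rest seen acc

def collect_name_variants (tags : List (String × String)) : List String :=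
  let names : List String := []
  let names := match pvGet? tags "name" with
    | some v => names ++ [v]
    | none => names
  -- sep ";" is nonempty, so split? is always `some`
  let names := match pvGet? tags "alt_name" with
    | some v => names ++ ((PySem.Str.split? v ";").getD []).filterMap (fun n =>
        if PySem.Str.strip n != "" then some (PySem.Str.strip n) else none)
    | none => names
  let names := tags.foldl (fun acc kv =>
    if PySem.Str.startswith kv.1 "name:" && kv.2 != "" then acc ++ [kv.2] else acc) names
  let names := match pvGet? tags "loc_name" with
    | some v => names ++ [v]
    | none => names
  let names := tags.foldl (fun acc kv =>
    if PySem.Str.startswith kv.1 "loc_name:" && kv.2 != "" then acc ++ [kv.2] else acc) names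
  let names := match pvGet? tags "short_name" with
    | some v => names ++ [v]
    | none => names
  let names := tags.foldl (fun acc kv =>
    if PySem.Str.startswith kv.1 "short_name:" && kv.2 != "" then acc ++ [kv.2] else acc) names
  pvDedupA names PySem.Set.empty []

-- ===== PORT B =====
structure PvBuckets where
  name   : List String
  alt    : List String
  nameC  : List String
  loc    : List String
  locC   : List String
  short  : List String
  shortC : List String
deriving Repr, DecidableEq

-- Source B: alt.extend(p for p in (s.strip() for s in value.split(";")) if p)
def pvParts (v : String) : List String :=
  (((PySem.Str.split? v ";").getD []).map PySem.Str.strip).filter (fun p => p != "")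

-- the elif chain of Source B's single pass
def pvRoute (b : PvBuckets) (kv : String × String) : PvBuckets :=
  if kv.1 == "name" then { b with name := b.name ++ [kv.2] }
  else if kv.1 == "alt_name" then { b with alt := b.alt ++ pvParts kv.2 }
  else if PySem.Str.startswith kv.1 "name:" then
    (if kv.2 != "" then { b with nameC := b.nameC ++ [kv.2] } else b)
  else if kv.1 == "loc_name" then { b with loc := b.loc ++ [kv.2] }
  else if PySem.Str.startswith kv.1 "loc_name:" then
    (if kv.2 != "" then { b with locC := b.locC ++ [kv.2] } else b)
  else if kv.1 == "short_name" then { b with short := b.short ++ [kv.2] }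
  else if PySem.Str.startswith kv.1 "short_name:" then
    (if kv.2 != "" then { b with shortC := b.shortC ++ [kv.2] } else b)
  else b

-- Source B's dedup loop, as a fold over (seen, out)
def pvDedupB (names : List String) : List String :=
  (names.foldl (fun (st : PySem.Set String × List String) n =>
    let s := PySem.Str.strip n
    if s != "" && !(PySem.Set.contains st.1 s) && decide (PySem.Str.len s ≤ 200) then
      (PySem.Set.add st.1 s, st.2 ++ [s])
    else st) (PySem.Set.empty, [])).2

def collect_name_variants_alt (tags : List (String × String)) : List String :=
  let b := tags.foldl pvRoute ⟨[], [], [], [], [], [], []⟩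
  pvDedupB (b.name ++ b.alt ++ b.nameC ++ b.loc ++ b.locC ++ b.short ++ b.shortC)

-- ===== PRECONDITION & SPEC =====
-- Pre_ excludes association lists with duplicate keys: a Python dict cannot contain
-- them, so such lists do not represent any input A was ever run on.
def Pre_collect_name_variants (tags : List (String × String)) : Prop :=
  (tags.map Prod.fst).Nodup
instance (tags : List (String × String)) : Decidable (Pre_collect_name_variants tags) := by
  unfold Pre_collect_name_variants; infer_instance

def pvWitness_collect_name_variants : (List (String × String)) :=
  [("name", "Ski Hut"), ("name:fr", "Refuge"), ("alt_name", "A; B"), ("other", "x")]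

def Spec_collect_name_variants (tags : List (String × String)) (out : List String) : Prop := out = collect_name_variants_alt tags
instance (tags : List (String × String)) (out : List String) : Decidable (Spec_collect_name_variants tags out) := by unfold Spec_collect_name_variants; infer_instance

-- ===== CLAIM (what is proved, stated in full; the proofs are below) =====
def Claim_equal_collect_name_variants : Prop := ∀ (tags : List (String × String)), Dom_collect_name_variants tags → Pre_collect_name_variants tags → Spec_collect_name_variants tags (collect_name_variants tags)

-- ===== LEMMAS AND PROOFS =====

-- the two dedup loops compute the same list
theorem pvDedup_eq (names : List String) (seen : PySem.Set String) (acc : List String) :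
    (names.foldl (fun (st : PySem.Set String × List String) n =>
      let s := PySem.Str.strip n
      if s != "" && !(PySem.Set.contains st.1 s) && decide (PySem.Str.len s ≤ 200) then
        (PySem.Set.add st.1 s, st.2 ++ [s])
      else st) (seen, acc)).2 = pvDedupA names seen acc := by
  induction names generalizing seen acc with
  | nil => rfl
  | cons n rest ih =>
    simp only [List.foldl_cons, pvDedupA]
    split <;> exact ih _ _

-- A's comprehension equals Source B's map/strip-then-filter parts
theorem pvParts_eq (v : String) :
    ((PySem.Str.split? v ";").getD []).filterMap (fun n =>
      if PySem.Str.strip n = "" then none else some (PySem.Str.strip n)) = pvParts v := by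
  unfold pvParts
  induction (PySem.Str.split? v ";").getD [] with
  | nil => rfl
  | cons x xs ih =>
    by_cases hx : PySem.Str.strip x = "" <;>
      · simp only [List.filterMap_cons, List.map_cons, List.filter_cons]
        simp [hx]
        simpa using ih

-- bucket routing: the single fold computes seven chain-condition filters
def pvC1 (tags : List (String × String)) : List String :=
  (tags.filter (fun kv => kv.1 == "name")).map (·.2)
def pvC2 (tags : List (String × String)) : List String :=
  (tags.filter (fun kv => !(kv.1 == "name") && kv.1 == "alt_name")).flatMap (fun kv => pvParts kv.2)
def pvC3 (tags : List (String × String)) : List String :=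
  (tags.filter (fun kv => !(kv.1 == "name") && !(kv.1 == "alt_name") &&
    PySem.Str.startswith kv.1 "name:" && kv.2 != "")).map (·.2)
def pvC4 (tags : List (String × String)) : List String :=
  (tags.filter (fun kv => !(kv.1 == "name") && !(kv.1 == "alt_name") &&
    !(PySem.Str.startswith kv.1 "name:") && kv.1 == "loc_name")).map (·.2)
def pvC5 (tags : List (String × String)) : List String :=
  (tags.filter (fun kv => !(kv.1 == "name") && !(kv.1 == "alt_name") &&
    !(PySem.Str.startswith kv.1 "name:") && !(kv.1 == "loc_name") &&
    PySem.Str.startswith kv.1 "loc_name:" && kv.2 != "")).map (·.2)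
def pvC6 (tags : List (String × String)) : List String :=
  (tags.filter (fun kv => !(kv.1 == "name") && !(kv.1 == "alt_name") &&
    !(PySem.Str.startswith kv.1 "name:") && !(kv.1 == "loc_name") &&
    !(PySem.Str.startswith kv.1 "loc_name:") && kv.1 == "short_name")).map (·.2)
def pvC7 (tags : List (String × String)) : List String :=
  (tags.filter (fun kv => !(kv.1 == "name") && !(kv.1 == "alt_name") &&
    !(PySem.Str.startswith kv.1 "name:") && !(kv.1 == "loc_name") &&
    !(PySem.Str.startswith kv.1 "loc_name:") && !(kv.1 == "short_name") &&
    PySem.Str.startswith kv.1 "short_name:" && kv.2 != "")).map (·.2)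

theorem pvRoute_fold (tags : List (String × String)) (b : PvBuckets) :
    tags.foldl pvRoute b =
      ⟨b.name ++ pvC1 tags, b.alt ++ pvC2 tags, b.nameC ++ pvC3 tags,
       b.loc ++ pvC4 tags, b.locC ++ pvC5 tags, b.short ++ pvC6 tags,
       b.shortC ++ pvC7 tags⟩ := by
  induction tags generalizing b with
  | nil => simp [pvC1, pvC2, pvC3, pvC4, pvC5, pvC6, pvC7]
  | cons kv rest ih =>
    obtain ⟨k, v⟩ := kv
    simp only [List.foldl_cons, ih]
    simp only [pvC1, pvC2, pvC3, pvC4, pvC5, pvC6, pvC7, List.filter_cons]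
    by_cases h1 : k = "name"
    · simp [pvRoute, h1, -PySem.Str.startswith_eq]
    · by_cases h2 : k = "alt_name"
      · simp [pvRoute, h1, h2, -PySem.Str.startswith_eq]
      · by_cases h3 : PySem.Str.startswith k "name:" = true
        · by_cases hv : v = "" <;> simp [pvRoute, h1, h2, h3, hv, -PySem.Str.startswith_eq]
        · by_cases h4 : k = "loc_name"
          · have e1 : PySem.Str.startswith "loc_name" "name:" = false := by decide
            simp [pvRoute, h1, h2, h3, h4, e1, -PySem.Str.startswith_eq]
          · by_cases h5 : PySem.Str.startswith k "loc_name:" = true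
            · by_cases hv : v = "" <;> simp [pvRoute, h1, h2, h3, h4, h5, hv, -PySem.Str.startswith_eq]
            · by_cases h6 : k = "short_name"
              · have e1 : PySem.Str.startswith "short_name" "name:" = false := by decide
                have e2 : PySem.Str.startswith "short_name" "loc_name:" = false := by decide
                simp [pvRoute, h1, h2, h3, h4, h5, h6, e1, e2, -PySem.Str.startswith_eq]
              · by_cases h7 : PySem.Str.startswith k "short_name:" = true
                · by_cases hv : v = "" <;> simp [pvRoute, h1, h2, h3, h4, h5, h6, h7, hv, -PySem.Str.startswith_eq]
                · simp [pvRoute, h1, h2, h3, h4, h5, h6, h7, -PySem.Str.startswith_eq]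

-- under nodup keys, the key-equality filter is the first-match lookup
theorem pvFilter_key (tags : List (String × String)) (k : String)
    (h : (tags.map Prod.fst).Nodup) :
    tags.filter (fun kv => kv.1 == k) =
      (match pvGet? tags k with | some v => [(k, v)] | none => []) := by
  induction tags with
  | nil => rfl
  | cons kv rest ih =>
    obtain ⟨k', v⟩ := kv
    simp only [List.map_cons, List.nodup_cons] at h
    by_cases hk : k' = k
    · subst hk
      have hnil : rest.filter (fun kv => kv.1 == k') = [] := by
        apply List.filter_eq_nil_iff.mpr
        intro kv hkv hbeq
        have hk1 : kv.1 = k' := by simpa using hbeq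
        exact h.1 (hk1 ▸ List.mem_map_of_mem hkv)
      simp [pvGet?, List.filter_cons, hnil]
    · simp only [List.filter_cons, pvGet?]
      simp only [beq_iff_eq, hk, if_false]
      exact ih h.2

-- startswith on a literal pins the initial characters of the key
theorem pv_sw (k p : String) (h : PySem.Str.startswith k p = true) :
    ∃ t, k.toList = p.toList ++ t := by
  have h1 : PySem.Chars.startswith k.toList p.toList = true := by
    rw [← PySem.Str.startswith_eq]; exact h
  obtain ⟨t, ht⟩ := (PySem.Chars.startswith_iff _ _).mp h1
  exact ⟨t, ht.symm⟩

-- exclusivity facts used to simplify the chain filters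
theorem pv_not_name_of_swname {k : String} (h : PySem.Str.startswith k "name:" = true) :
    k ≠ "name" := by
  obtain ⟨t, ht⟩ := pv_sw k _ h
  intro he; subst he; simp at ht
theorem pv_not_alt_of_swname {k : String} (h : PySem.Str.startswith k "name:" = true) :
    k ≠ "alt_name" := by
  obtain ⟨t, ht⟩ := pv_sw k _ h
  intro he; subst he; simp at ht
theorem pv_not_swname_of_swloc {k : String} (h : PySem.Str.startswith k "loc_name:" = true) :
    PySem.Str.startswith k "name:" = false := by
  obtain ⟨t, ht⟩ := pv_sw k _ h
  cases hsw : PySem.Str.startswith k "name:" with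
  | false => rfl
  | true =>
    obtain ⟨u, hu⟩ := pv_sw k _ hsw
    rw [ht] at hu; simp at hu
theorem pv_not_swname_of_swshort {k : String} (h : PySem.Str.startswith k "short_name:" = true) :
    PySem.Str.startswith k "name:" = false := by
  obtain ⟨t, ht⟩ := pv_sw k _ h
  cases hsw : PySem.Str.startswith k "name:" with
  | false => rfl
  | true =>
    obtain ⟨u, hu⟩ := pv_sw k _ hsw
    rw [ht] at hu; simp at hu
theorem pv_not_swloc_of_swshort {k : String} (h : PySem.Str.startswith k "short_name:" = true) :
    PySem.Str.startswith k "loc_name:" = false := by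
  obtain ⟨t, ht⟩ := pv_sw k _ h
  cases hsw : PySem.Str.startswith k "loc_name:" with
  | false => rfl
  | true =>
    obtain ⟨u, hu⟩ := pv_sw k _ hsw
    rw [ht] at hu; simp at hu
theorem pv_lits_of_swloc {k : String} (h : PySem.Str.startswith k "loc_name:" = true) :
    k ≠ "name" ∧ k ≠ "alt_name" ∧ k ≠ "loc_name" := by
  obtain ⟨t, ht⟩ := pv_sw k _ h
  refine ⟨?_, ?_, ?_⟩ <;> (intro he; subst he; simp at ht)
theorem pv_lits_of_swshort {k : String} (h : PySem.Str.startswith k "short_name:" = true) :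
    k ≠ "name" ∧ k ≠ "alt_name" ∧ k ≠ "loc_name" ∧ k ≠ "short_name" := by
  obtain ⟨t, ht⟩ := pv_sw k _ h
  refine ⟨?_, ?_, ?_, ?_⟩ <;> (intro he; subst he; simp at ht)

-- chain filters simplify to A's plain conditions
theorem pvC3_eq (tags : List (String × String)) :
    pvC3 tags = (tags.filter (fun kv => PySem.Str.startswith kv.1 "name:" && kv.2 != "")).map (·.2) := by
  unfold pvC3
  congr 1
  apply List.filter_congr
  intro kv _
  by_cases h : PySem.Str.startswith kv.1 "name:" = true
  · simp [h, pv_not_name_of_swname h, pv_not_alt_of_swname h, -PySem.Str.startswith_eq]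
  · simp [Bool.eq_false_iff.mpr h, -PySem.Str.startswith_eq]
theorem pvC5_eq (tags : List (String × String)) :
    pvC5 tags = (tags.filter (fun kv => PySem.Str.startswith kv.1 "loc_name:" && kv.2 != "")).map (·.2) := by
  unfold pvC5
  congr 1
  apply List.filter_congr
  intro kv _
  by_cases h : PySem.Str.startswith kv.1 "loc_name:" = true
  · obtain ⟨ha, hb, hc⟩ := pv_lits_of_swloc h
    simp [h, ha, hb, hc, pv_not_swname_of_swloc h, -PySem.Str.startswith_eq]
  · simp [Bool.eq_false_iff.mpr h, -PySem.Str.startswith_eq]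
theorem pvC7_eq (tags : List (String × String)) :
    pvC7 tags = (tags.filter (fun kv => PySem.Str.startswith kv.1 "short_name:" && kv.2 != "")).map (·.2) := by
  unfold pvC7
  congr 1
  apply List.filter_congr
  intro kv _
  by_cases h : PySem.Str.startswith kv.1 "short_name:" = true
  · obtain ⟨ha, hb, hc, hd⟩ := pv_lits_of_swshort h
    simp [h, ha, hb, hc, hd, pv_not_swname_of_swshort h, pv_not_swloc_of_swshort h, -PySem.Str.startswith_eq]
  · simp [Bool.eq_false_iff.mpr h, -PySem.Str.startswith_eq]

-- exact-key segments are the first-match lookups (under nodup keys)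
theorem pvC1_eq (tags : List (String × String)) (h : (tags.map Prod.fst).Nodup) :
    pvC1 tags = (match pvGet? tags "name" with | some v => [v] | none => []) := by
  unfold pvC1; rw [pvFilter_key tags _ h]; cases pvGet? tags "name" <;> simp
theorem pvC2_eq (tags : List (String × String)) (h : (tags.map Prod.fst).Nodup) :
    pvC2 tags = (match pvGet? tags "alt_name" with | some v => pvParts v | none => []) := by
  unfold pvC2
  have hf : tags.filter (fun kv => !(kv.1 == "name") && kv.1 == "alt_name") =
      tags.filter (fun kv => kv.1 == "alt_name") := by
    apply List.filter_congr
    intro kv _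
    by_cases hk : kv.1 = "alt_name" <;> simp [hk]
  rw [hf, pvFilter_key tags _ h]; cases pvGet? tags "alt_name" <;> simp
theorem pvC4_eq (tags : List (String × String)) (h : (tags.map Prod.fst).Nodup) :
    pvC4 tags = (match pvGet? tags "loc_name" with | some v => [v] | none => []) := by
  unfold pvC4
  have hf : tags.filter (fun kv => !(kv.1 == "name") && !(kv.1 == "alt_name") &&
      !(PySem.Str.startswith kv.1 "name:") && kv.1 == "loc_name") =
      tags.filter (fun kv => kv.1 == "loc_name") := by
    apply List.filter_congr
    intro kv _
    have e1 : PySem.Str.startswith "loc_name" "name:" = false := by decide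
    by_cases hk : kv.1 = "loc_name" <;> simp [hk, e1, -PySem.Str.startswith_eq]
  rw [hf, pvFilter_key tags _ h]; cases pvGet? tags "loc_name" <;> simp
theorem pvC6_eq (tags : List (String × String)) (h : (tags.map Prod.fst).Nodup) :
    pvC6 tags = (match pvGet? tags "short_name" with | some v => [v] | none => []) := by
  unfold pvC6
  have hf : tags.filter (fun kv => !(kv.1 == "name") && !(kv.1 == "alt_name") &&
      !(PySem.Str.startswith kv.1 "name:") && !(kv.1 == "loc_name") &&
      !(PySem.Str.startswith kv.1 "loc_name:") && kv.1 == "short_name") =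
      tags.filter (fun kv => kv.1 == "short_name") := by
    apply List.filter_congr
    intro kv _
    have e1 : PySem.Str.startswith "short_name" "name:" = false := by decide
    have e2 : PySem.Str.startswith "short_name" "loc_name:" = false := by decide
    by_cases hk : kv.1 = "short_name" <;> simp [hk, e1, e2, -PySem.Str.startswith_eq]
  rw [hf, pvFilter_key tags _ h]; cases pvGet? tags "short_name" <;> simp

-- ===== VERDICT (by name: the statement is the Claim_ definition above) =====
theorem collect_name_variants_spec : Claim_equal_collect_name_variants := by
  intro tags _ hpre
  unfold Spec_collect_name_variants
  have hpre' : (tags.map Prod.fst).Nodup := hpre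
  simp only [collect_name_variants, collect_name_variants_alt]
  rw [pvRoute_fold]
  simp only [pvDedupB]
  rw [pvDedup_eq]
  congr 1
  rw [PySem.List.foldl_append_if (fun kv => PySem.Str.startswith kv.1 "name:" && kv.2 != "") (fun kv : String × String => kv.2),
      PySem.List.foldl_append_if (fun kv => PySem.Str.startswith kv.1 "loc_name:" && kv.2 != "") (fun kv : String × String => kv.2),
      PySem.List.foldl_append_if (fun kv => PySem.Str.startswith kv.1 "short_name:" && kv.2 != "") (fun kv : String × String => kv.2)]
  rw [pvC1_eq tags hpre', pvC2_eq tags hpre', pvC3_eq, pvC4_eq tags hpre',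
      pvC5_eq, pvC6_eq tags hpre', pvC7_eq]
  cases pvGet? tags "name" <;> cases pvGet? tags "alt_name" <;>
    cases pvGet? tags "loc_name" <;> cases pvGet? tags "short_name" <;>
    simp [pvParts_eq]
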